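-- pv_equiv track=rewrite | github.com/sureserverman/and-hole | scripts/blocklist_probe_suite.py | is_usable_blocked
-- ===== SOURCE A (Python) =====
-- def is_usable_blocked(entry: str) -> bool:
--     n = entry.strip().lower()
--     if not n.endswith("."):
--         n = n + "."
--     body = n.rstrip(".")
--     if not body or "." not in body:
--         return False
--     try:
--         for label in body.split("."):
--             label.encode("ascii")
--             if not label or len(label) > 63:
--                 return False
--     except UnicodeEncodeError:
--         return False
--     return True
-- ===== SOURCE B (Python) =====
-- def is_usable_blocked(entry: str) -> bool:
--     # single left-to-right scan over the normalized body; no split, no per-label loop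
--     body = entry.strip().lower().rstrip(".")
--     dots = 0
--     run = 0
--     for ch in body:
--         if ch == ".":
--             if run == 0 or run > 63:
--                 return False
--             dots += 1
--             run = 0
--         else:
--             if ord(ch) > 127:
--                 return False
--             run += 1
--     return dots > 0 and 1 <= run <= 63
-- ===== Notes on version B (the rewrite author's own statement) =====
-- stated objective: alternative
-- what changed: Replaces A's splitting of the body into a label list plus a per-label loop of ASCII/emptiness/length checks (and the separate empty-body and no-dot guards) by a single left-to-right scan over the normalized body that tracks the current label length and the number of dots seen.
import Mathlib
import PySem

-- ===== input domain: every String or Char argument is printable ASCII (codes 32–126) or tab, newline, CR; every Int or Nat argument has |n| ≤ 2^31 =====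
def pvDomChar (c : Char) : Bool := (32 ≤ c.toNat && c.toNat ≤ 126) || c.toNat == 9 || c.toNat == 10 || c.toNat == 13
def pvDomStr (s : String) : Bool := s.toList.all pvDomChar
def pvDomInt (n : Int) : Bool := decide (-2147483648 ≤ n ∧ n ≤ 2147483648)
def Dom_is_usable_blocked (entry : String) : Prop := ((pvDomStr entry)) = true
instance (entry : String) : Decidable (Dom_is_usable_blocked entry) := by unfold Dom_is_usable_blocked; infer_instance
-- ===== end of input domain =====

-- B replaces A's split-into-labels-plus-per-label loop by a single left-to-right scan tracking
-- the current label length and the number of dots (objective: alternative single-pass algorithm).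

-- ===== PORT A =====

-- exact port of s.rstrip("."): drop trailing '.' characters
def pvRstripDot (cs : List Char) : List Char :=
  (cs.reverse.dropWhile (fun c => c == '.')).reverse

-- the for-loop over body.split("."): label.encode("ascii") raising UnicodeEncodeError
-- (some char with code point > 127) makes the whole call return False via the except.
def pvCheckLabels : List (List Char) → Bool
  | [] => true
  | l :: rest =>
    if !(l.all fun c => c.toNat ≤ 127) then false
    else if l.isEmpty || decide (l.length > 63) then false
    else pvCheckLabels rest

def is_usable_blocked (entry : String) : Bool :=
  let n := PySem.Chars.lower (PySem.Chars.strip entry.toList)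
  let n := if PySem.Chars.endswith n ['.'] then n else n ++ ['.']
  let body := pvRstripDot n
  if body.isEmpty || !(PySem.Chars.isIn ['.'] body) then false
  else pvCheckLabels (PySem.Chars.splitOn body ['.'])

-- ===== PORT B =====

-- the for-loop of Source B: dots = dots so far, run = length of the current label
def pvScan : List Char → Nat → Nat → Bool
  | [], dots, run => decide (0 < dots) && (decide (1 ≤ run) && decide (run ≤ 63))
  | c :: rest, dots, run =>
    if c = '.' then
      if run = 0 || decide (run > 63) then false else pvScan rest (dots + 1) 0
    else
      if decide (c.toNat > 127) then false else pvScan rest dots (run + 1)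

def is_usable_blocked_alt (entry : String) : Bool :=
  let body := pvRstripDot (PySem.Chars.lower (PySem.Chars.strip entry.toList))
  pvScan body 0 0

-- ===== PRECONDITION & SPEC =====
def Spec_is_usable_blocked (entry : String) (out : Bool) : Prop := out = is_usable_blocked_alt entry
instance (entry : String) (out : Bool) : Decidable (Spec_is_usable_blocked entry out) := by unfold Spec_is_usable_blocked; infer_instance

-- ===== CLAIM (what is proved, stated in full; the proofs are below) =====
def Claim_equal_is_usable_blocked : Prop := ∀ (entry : String), Dom_is_usable_blocked entry → Spec_is_usable_blocked entry (is_usable_blocked entry)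

-- ===== LEMMAS AND PROOFS =====

-- reference splitter: pvMySplit pre body = the pieces of (pre ++ body) split at '.',
-- where pre contains no '.' (the part of the current piece already read)
def pvMySplit (pre : List Char) : List Char → List (List Char)
  | [] => [pre]
  | c :: rest => if c = '.' then pre :: pvMySplit [] rest else pvMySplit (pre ++ [c]) rest

theorem pvSplitOn_go_eq (l : List Char) : ∀ (fuel : Nat) (cur : List Char)
    (acc : List (List Char)), l.length < fuel →
    PySem.Chars.splitOn.go ['.'] fuel l cur acc = acc.reverse ++ pvMySplit cur.reverse l := by
  induction l with
  | nil =>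
    intro fuel cur acc h
    match fuel, h with
    | fuel + 1, _ => simp [PySem.Chars.splitOn.go, pvMySplit]
  | cons c rest ih =>
    intro fuel cur acc h
    match fuel, h with
    | fuel + 1, h =>
      by_cases hc : c = '.'
      · subst hc
        have hpre : List.isPrefixOf ['.'] ('.' :: rest) = true := by
          simp [List.isPrefixOf]
        rw [PySem.Chars.splitOn.go, if_pos hpre]
        have hdrop : List.drop (['.'] : List Char).length ('.' :: rest) = rest := rfl
        rw [hdrop]
        simp only [List.length_cons] at h
        rw [ih fuel [] (cur.reverse :: acc) (by omega)]
        simp [pvMySplit]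
      · have hpre : List.isPrefixOf ['.'] (c :: rest) = false := by
          simp [List.isPrefixOf, Ne.symm hc]
        rw [PySem.Chars.splitOn.go, if_neg (by simp [hpre])]
        simp only [List.length_cons] at h
        rw [ih fuel (c :: cur) acc (by omega)]
        simp [pvMySplit, hc]

theorem pvSplitOn_eq (body : List Char) :
    PySem.Chars.splitOn body ['.'] = pvMySplit [] body := by
  have := pvSplitOn_go_eq body (body.length + 1) [] [] (by omega)
  simpa [PySem.Chars.splitOn] using this

theorem pvCheckLabels_bad (body : List Char) : ∀ (pre : List Char),
    (pre.all fun c => c.toNat ≤ 127) = false →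
    pvCheckLabels (pvMySplit pre body) = false := by
  induction body with
  | nil => intro pre h; simp [pvMySplit, pvCheckLabels, h]
  | cons c rest ih =>
    intro pre h
    by_cases hc : c = '.'
    · simp [pvMySplit, hc, pvCheckLabels, h]
    · have h' : ((pre ++ [c]).all fun c => c.toNat ≤ 127) = false := by
        simp only [List.all_append, Bool.and_eq_false_iff]
        exact Or.inl h
      simp [pvMySplit, hc, ih _ h']

theorem pvScan_cons_dot (rest : List Char) (dots run : Nat) :
    pvScan ('.' :: rest) dots run =
      if run = 0 || decide (run > 63) then false else pvScan rest (dots + 1) 0 := by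
  simp [pvScan]

theorem pvScan_cons_ne {c : Char} (hc : c ≠ '.') (rest : List Char) (dots run : Nat) :
    pvScan (c :: rest) dots run =
      if decide (c.toNat > 127) then false else pvScan rest dots (run + 1) := by
  simp [pvScan, hc]

theorem pvScan_eq_check (body : List Char) : ∀ (pre : List Char) (dots : Nat),
    (pre.all fun c => c.toNat ≤ 127) = true →
    pvScan body dots pre.length =
      (pvCheckLabels (pvMySplit pre body) && decide (0 < dots + body.count '.')) := by
  induction body with
  | nil =>
    intro pre dots hpre
    cases pre with
    | nil => simp [pvScan, pvMySplit, pvCheckLabels]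
    | cons x xs =>
      by_cases h63 : (x :: xs).length > 63
      · simp only [List.length_cons] at h63
        have a1 : decide (xs.length < 63) = false := by simp; omega
        have a2 : decide (63 ≤ xs.length) = true := by simp; omega
        simp [pvScan, pvMySplit, pvCheckLabels, hpre, a1, a2]
      · simp only [List.length_cons] at h63
        have a1 : decide (xs.length < 63) = true := by simp; omega
        have a2 : decide (63 ≤ xs.length) = false := by simp; omega
        simp [pvScan, pvMySplit, pvCheckLabels, hpre, a1, a2, Bool.and_comm]
  | cons c rest ih =>
    intro pre dots hpre
    by_cases hc : c = '.'
    · subst hc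
      rw [pvScan_cons_dot]
      have hsplit : pvMySplit pre ('.' :: rest) = pre :: pvMySplit [] rest := by
        simp [pvMySplit]
      rw [hsplit, List.count_cons_self]
      by_cases h0 : pre.length = 0
      · have : pre = [] := List.eq_nil_of_length_eq_zero h0
        simp [this, pvCheckLabels]
      · have he : pre.isEmpty = false := by
          cases pre with
          | nil => exact absurd rfl h0
          | cons _ _ => rfl
        by_cases h63 : pre.length > 63
        · simp [h0, h63, pvCheckLabels, hpre, he]
        · rw [if_neg (by simp [h0]; omega)]
          rw [show pvScan rest (dots + 1) 0 = pvScan rest (dots + 1) (List.length ([] : List Char)) from rfl]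
          rw [ih [] (dots + 1) (by simp)]
          simp only [pvCheckLabels, hpre, Bool.not_true, he, h63, decide_false,
            Bool.or_self, Bool.false_eq_true, if_false]
          have h1 : (0 < dots + 1 + rest.count '.') := by omega
          have h2 : (0 < dots + ('.' :: rest).count '.') := by
            simp [List.count_cons_self]
          simp only [List.count_cons_self] at h2 ⊢
          simp [h1, h2]
    · rw [pvScan_cons_ne hc]
      have hsplit : pvMySplit pre (c :: rest) = pvMySplit (pre ++ [c]) rest := by
        simp [pvMySplit, hc]
      rw [hsplit]
      by_cases ha : c.toNat > 127
      · have hbad : ((pre ++ [c]).all fun c => c.toNat ≤ 127) = false := by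
          simp; intro; omega
        simp [ha, pvCheckLabels_bad rest _ hbad]
      · have hgood : ((pre ++ [c]).all fun c => c.toNat ≤ 127) = true := by
          simp at hpre ⊢; exact ⟨hpre, by omega⟩
        have hlen : pre.length + 1 = (pre ++ [c]).length := by simp
        simp only [ha, decide_false, Bool.false_eq_true, if_false, hlen]

        rw [ih (pre ++ [c]) dots hgood]
        have hcount : (c :: rest).count '.' = rest.count '.' := by
          rw [List.count_cons]; simp [hc]
        rw [hcount]

-- A's trailing-dot normalization collapses: rstrip(".") absorbs the appended "."
theorem pvRstripDot_append (cs : List Char) : pvRstripDot (cs ++ ['.']) = pvRstripDot cs := by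
  simp [pvRstripDot]

-- the core equality on any body list
theorem pvCore_eq (body : List Char) :
    (if body.isEmpty || !(PySem.Chars.isIn ['.'] body) then false
     else pvCheckLabels (PySem.Chars.splitOn body ['.'])) = pvScan body 0 0 := by
  have hscan := pvScan_eq_check body [] 0 (by simp)
  simp only [List.length_nil] at hscan
  rw [hscan, pvSplitOn_eq]
  by_cases hmem : '.' ∈ body
  · have hin : PySem.Chars.isIn ['.'] body = true := by
      rw [PySem.Chars.isIn_iff_infix]
      obtain ⟨sfx, t, hst⟩ := List.append_of_mem hmem
      exact ⟨sfx, t, by simp [hst]⟩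
    have hne : body.isEmpty = false := by
      cases body with
      | nil => cases hmem
      | cons _ _ => rfl
    have hcount : 0 < body.count '.' := List.count_pos_iff.mpr hmem
    simp [hin, hne, hcount]
  · have hcount : body.count '.' = 0 := List.count_eq_zero.mpr hmem
    have hin : PySem.Chars.isIn ['.'] body = false := by
      rw [PySem.Chars.isIn_eq_false_iff]
      intro hinf
      exact hmem (hinf.subset (by simp))
    simp [hin, hcount]

-- ===== VERDICT (by name: the statement is the Claim_ definition above) =====
theorem is_usable_blocked_spec : Claim_equal_is_usable_blocked := by
  intro entry _
  unfold Spec_is_usable_blocked is_usable_blocked is_usable_blocked_alt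
  set n := PySem.Chars.lower (PySem.Chars.strip entry.toList) with hn
  by_cases hend : PySem.Chars.endswith n ['.'] = true
  · simp only [hend, if_true]
    exact pvCore_eq (pvRstripDot n)
  · simp only [hend, if_false, Bool.false_eq_true]
    rw [pvRstripDot_append]
    exact pvCore_eq (pvRstripDot n)
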